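-- pv_equiv track=rewrite | github.com/pedroregato/process2diagram | core/project_store.py | _extract_passages
-- ===== SOURCE A (Python) =====
-- def _extract_passages(
--     transcript: str,
--     keywords: list[str],
--     context_lines: int = 4,
--     max_passages: int = 6,
-- ) -> list[str]:
--     """
--     Find lines in the transcript that contain any of the keywords and return
--     surrounding passages (context_lines before and after each match).
--
--     Consecutive matching regions (gap <= 2 lines) are merged into a single passage.
--     Returns up to max_passages passages as strings.
--     """
--     if not keywords or not transcript:
--         return []
--
--     lines = [ln for ln in transcript.splitlines() if ln.strip()]
--     if not lines:
--         return []
--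
--     # Find indices of lines containing any keyword
--     matching_indices: set[int] = set()
--     for i, line in enumerate(lines):
--         line_lower = line.lower()
--         if any(kw in line_lower for kw in keywords):
--             matching_indices.add(i)
--
--     if not matching_indices:
--         return []
--
--     # Expand each match with context
--     expanded: set[int] = set()
--     for idx in matching_indices:
--         for offset in range(-context_lines, context_lines + 1):
--             neighbor = idx + offset
--             if 0 <= neighbor < len(lines):
--                 expanded.add(neighbor)
--
--     # Sort and group into consecutive runs (gap <= 2)
--     sorted_indices = sorted(expanded)
--     groups: list[list[int]] = []
--     current_group: list[int] = [sorted_indices[0]]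
--     for idx in sorted_indices[1:]:
--         if idx - current_group[-1] <= 2:
--             current_group.append(idx)
--         else:
--             groups.append(current_group)
--             current_group = [idx]
--     groups.append(current_group)
--
--     # Build passage strings, limited to max_passages
--     passages = []
--     for group in groups[:max_passages]:
--         passage_lines = [lines[i] for i in group]
--         passages.append("\n".join(passage_lines))
--
--     return passages
-- ===== SOURCE B (Python) =====
-- def _extract_passages(
--     transcript: str,
--     keywords: list[str],
--     context_lines: int = 4,
--     max_passages: int = 6,
-- ) -> list[str]:
--     """Single left-to-right scan: a line index j belongs to a passage iff some
--     keyword-matching line lies within context_lines of it; passages are flushed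
--     whenever the gap between consecutive covered lines exceeds 2."""
--     if not keywords or not transcript:
--         return []
--
--     lines = [ln for ln in transcript.splitlines() if ln.strip()]
--     match = [any(kw in ln.lower() for kw in keywords) for ln in lines]
--     if True not in match:
--         return []
--
--     n = len(lines)
--     passages: list[str] = []
--     current: list[str] = []
--     last = None  # index of the previous covered line
--     for j in range(n):
--         covered = any(match[k] for k in range(max(0, j - context_lines),
--                                               min(n, j + context_lines + 1)))
--         if covered:
--             if last is None or j - last > 2:
--                 if current:
--                     passages.append("\n".join(current))
--                 current = [lines[j]]
--             else:
--                 current.append(lines[j])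
--             last = j
--     if current:
--         passages.append("\n".join(current))
--     return passages[:max_passages]
-- ===== Notes on version B (the rewrite author's own statement) =====
-- stated objective: alternative
-- what changed: A builds a match set, expands every match into a second set, sorts it and groups the sorted indices in two further passes; B makes one left-to-right scan over line indices with a per-index window test (is some keyword-matching line within context_lines) and flushes a passage whenever the gap between consecutive covered lines exceeds 2, building the passage strings directly; B does no set-building and no sort, but its window test costs O(context_lines) per line, so it is slower than A when context_lines is large.
import Mathlib
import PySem

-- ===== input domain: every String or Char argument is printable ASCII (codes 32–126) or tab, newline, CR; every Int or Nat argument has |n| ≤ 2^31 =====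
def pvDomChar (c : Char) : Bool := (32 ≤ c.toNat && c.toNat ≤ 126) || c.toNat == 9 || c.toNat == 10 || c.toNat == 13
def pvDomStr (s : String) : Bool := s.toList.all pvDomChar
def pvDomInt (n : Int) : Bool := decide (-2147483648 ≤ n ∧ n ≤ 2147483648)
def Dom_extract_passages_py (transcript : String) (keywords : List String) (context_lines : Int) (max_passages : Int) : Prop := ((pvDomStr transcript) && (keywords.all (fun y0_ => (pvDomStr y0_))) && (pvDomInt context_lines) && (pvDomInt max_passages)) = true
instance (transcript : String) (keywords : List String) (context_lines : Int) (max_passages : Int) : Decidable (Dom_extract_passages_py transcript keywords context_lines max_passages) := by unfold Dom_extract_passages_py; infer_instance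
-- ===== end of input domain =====

-- B replaces A's two set-builds + sort + group passes by one left-to-right scan over line
-- indices with a per-index coverage window test and gap-based flushing (objective:
-- alternative, not faster: B's window test is O(context_lines) per line).
-- Both Pythons share the same opening lines (non-blank split, keyword match); ported once below.

-- helpers shared by both ports (the identical opening lines of A and B)
def pvLines (transcript : String) : List String :=
  (PySem.Str.splitlines transcript).filter (fun ln => !(PySem.Str.len (PySem.Str.strip ln) == 0))

def pvMatches (keywords : List String) (line : String) : Bool :=
  keywords.any (fun kw => PySem.Str.isIn kw (PySem.Str.lower line))

-- ===== PORT A =====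
def extract_passages_py (transcript : String) (keywords : List String) (context_lines : Int) (max_passages : Int) : List String :=
  if keywords = [] ∨ transcript = "" then []
  else
    let lines := pvLines transcript
    if lines = [] then []
    else
      let matching : PySem.Set Int :=
        (PySem.List.enumerate lines 0).foldl
          (fun s p => if pvMatches keywords p.2 then PySem.Set.add s p.1 else s) PySem.Set.empty
      if matching = [] then []
      else
        let expanded : PySem.Set Int :=
          matching.foldl
            (fun s idx =>
              (PySem.List.pyRange (-context_lines) (context_lines + 1) 1).foldl
                (fun s offset =>
                  if 0 ≤ idx + offset ∧ idx + offset < (lines.length : Int) then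
                    PySem.Set.add s (idx + offset)
                  else s) s)
            PySem.Set.empty
        let sorted_indices := PySem.List.sorted expanded (fun x => x) false
        match sorted_indices with
        | [] => []  -- Python raises IndexError at sorted_indices[0]; outside Pre_
        | first :: rest =>
          let st := rest.foldl
            (fun (st : List (List Int) × List Int) idx =>
              if idx - PySem.List.pyGetD st.2 (-1) 0 ≤ 2 then (st.1, st.2 ++ [idx])
              else (st.1 ++ [st.2], [idx]))
            ([], [first])
          let groups := st.1 ++ [st.2]
          (PySem.List.slice groups none (some max_passages)).map
            (fun group => PySem.Str.join "\n" (group.map (fun i => PySem.List.pyGetD lines i "")))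

-- ===== PORT B =====
def pvCovered (match_ : List Bool) (n c j : Int) : Bool :=
  (PySem.List.pyRange (max 0 (j - c)) (min n (j + c + 1)) 1).any
    (fun k => PySem.List.pyGetD match_ k false)

def extract_passages_py_alt (transcript : String) (keywords : List String) (context_lines : Int) (max_passages : Int) : List String :=
  if keywords = [] ∨ transcript = "" then []
  else
    let lines := pvLines transcript
    let match_ := lines.map (pvMatches keywords)
    if !(match_.contains true) then []
    else
      let n : Int := (lines.length : Int)
      let st :=
        (PySem.List.pyRange 0 n 1).foldl
          (fun (st : List String × List String × Option Int) j =>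
            if pvCovered match_ n context_lines j then
              if (match st.2.2 with | none => true | some l => decide (2 < j - l)) then
                ((if st.2.1 = [] then st.1 else st.1 ++ [PySem.Str.join "\n" st.2.1]),
                 [PySem.List.pyGetD lines j ""], some j)
              else (st.1, st.2.1 ++ [PySem.List.pyGetD lines j ""], some j)
            else st)
          ([], [], none)
      let passages := if st.2.1 = [] then st.1 else st.1 ++ [PySem.Str.join "\n" st.2.1]
      PySem.List.slice passages none (some max_passages)

-- ===== PRECONDITION & SPEC =====
-- Pre_ excludes exactly the inputs where A raises IndexError: a negative context_lines
-- together with at least one keyword-matching non-blank line (empty expanded set, then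
-- sorted_indices[0] raises). A returns normally on every other input.
def Pre_extract_passages_py (transcript : String) (keywords : List String) (context_lines : Int) (max_passages : Int) : Prop :=
  0 ≤ context_lines ∨ keywords = [] ∨
    (pvLines transcript).all (fun ln => !pvMatches keywords ln) = true
instance (transcript : String) (keywords : List String) (context_lines : Int) (max_passages : Int) : Decidable (Pre_extract_passages_py transcript keywords context_lines max_passages) := by unfold Pre_extract_passages_py; infer_instance

def pvWitness_extract_passages_py : String × List String × Int × Int :=
  ("alpha\nkey line\nbeta", ["key"], 1, 6)

def Spec_extract_passages_py (transcript : String) (keywords : List String) (context_lines : Int) (max_passages : Int) (out : List String) : Prop := out = extract_passages_py_alt transcript keywords context_lines max_passages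
instance (transcript : String) (keywords : List String) (context_lines : Int) (max_passages : Int) (out : List String) : Decidable (Spec_extract_passages_py transcript keywords context_lines max_passages out) := by unfold Spec_extract_passages_py; infer_instance

-- ===== CLAIM (what is proved, stated in full; the proofs are below) =====
def Claim_equal_extract_passages_py : Prop := ∀ (transcript : String) (keywords : List String) (context_lines : Int) (max_passages : Int), Dom_extract_passages_py transcript keywords context_lines max_passages → Pre_extract_passages_py transcript keywords context_lines max_passages → Spec_extract_passages_py transcript keywords context_lines max_passages (extract_passages_py transcript keywords context_lines max_passages)

-- ===== LEMMAS AND PROOFS =====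

-- abbreviations for the proof (line fetch and passage join, as both ports build them)
def pvG (lines : List String) (i : Int) : String := PySem.List.pyGetD lines i ""
def pvJ (lines : List String) (g : List Int) : String := PySem.Str.join "\n" (g.map (pvG lines))

-- the neighbourhood list a single match idx contributes to A's expanded set
def pvNeigh (c n idx : Int) : List Int :=
  ((PySem.List.pyRange (-c) (c + 1) 1).filter
    (fun off => decide (0 ≤ idx + off ∧ idx + off < n))).map (fun off => idx + off)

-- index k is a keyword-matching line
def pvMatchIdx (lines : List String) (keywords : List String) (y : Int) : Prop :=
  ∃ (k : Nat), ∃ (_ : k < lines.length), y = (k : Int) ∧ pvMatches keywords lines[k] = true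

theorem pv_mem_matching (lines keywords : List String) (y : Int) :
    y ∈ (PySem.List.enumerate lines 0).foldl
          (fun s p => if pvMatches keywords p.2 then PySem.Set.add s p.1 else s) PySem.Set.empty
      ↔ pvMatchIdx lines keywords y := by
  have h := PySem.List.foldl_if_eq_foldl_filter
    (fun (p : Int × String) => pvMatches keywords p.2)
    (fun s (p : Int × String) => PySem.Set.add s p.1)
    (PySem.List.enumerate lines 0) PySem.Set.empty
  rw [h, ← PySem.Set.update_map_eq_foldl_add _ Prod.fst, PySem.Set.mem_update]
  simp only [PySem.Set.empty, List.not_mem_nil, false_or, List.mem_map, List.mem_filter,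
    PySem.List.mem_enumerate_iff, pvMatchIdx]
  constructor
  · rintro ⟨p, ⟨⟨k, hk, rfl⟩, hm⟩, rfl⟩
    exact ⟨k, hk, by simp, by simpa using hm⟩
  · rintro ⟨k, hk, rfl, hm⟩
    exact ⟨((k : Int), lines[k]), ⟨⟨k, hk, by simp⟩, hm⟩, rfl⟩

theorem pv_mem_neigh (c n idx y : Int) :
    y ∈ pvNeigh c n idx ↔ 0 ≤ y ∧ y < n ∧ idx - c ≤ y ∧ y ≤ idx + c := by
  simp only [pvNeigh, List.mem_map, List.mem_filter, PySem.List.mem_pyRange_one,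
    decide_eq_true_eq]
  constructor
  · rintro ⟨off, ⟨⟨h1, h2⟩, h3, h4⟩, rfl⟩; omega
  · rintro ⟨h1, h2, h3, h4⟩; exact ⟨y - idx, ⟨⟨by omega, by omega⟩, by omega, by omega⟩, by omega⟩

theorem pv_mem_foldl_update (l : List Int) (g : Int → List Int) (s : PySem.Set Int) (y : Int) :
    y ∈ l.foldl (fun s i => PySem.Set.update s (g i)) s ↔ y ∈ s ∨ ∃ i ∈ l, y ∈ g i := by
  induction l generalizing s with
  | nil => simp
  | cons a t ih =>
    simp only [List.foldl_cons, ih, PySem.Set.mem_update, List.mem_cons]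
    constructor
    · rintro (⟨h | h⟩ | ⟨i, hi, hy⟩)
      · exact Or.inl h
      · exact Or.inr ⟨a, Or.inl rfl, h⟩
      · exact Or.inr ⟨i, Or.inr hi, hy⟩
    · rintro (h | ⟨i, rfl | hi, hy⟩)
      · exact Or.inl (Or.inl h)
      · exact Or.inl (Or.inr hy)
      · exact Or.inr ⟨i, hi, hy⟩

theorem pv_nodup_foldl_update (l : List Int) (g : Int → List Int) (s : PySem.Set Int)
    (hs : s.Nodup) : (l.foldl (fun s i => PySem.Set.update s (g i)) s).Nodup := by
  induction l generalizing s with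
  | nil => exact hs
  | cons a t ih => exact ih _ (PySem.Set.nodup_update _ _ hs)

-- A's expansion loop, rewritten as a fold of Set.update over the neighbourhood lists
theorem pv_expanded_eq (c n : Int) (matching : List Int) (s : PySem.Set Int) :
    matching.foldl
      (fun s idx =>
        (PySem.List.pyRange (-c) (c + 1) 1).foldl
          (fun s offset =>
            if 0 ≤ idx + offset ∧ idx + offset < n then PySem.Set.add s (idx + offset) else s) s) s
    = matching.foldl (fun s idx => PySem.Set.update s (pvNeigh c n idx)) s := by
  apply PySem.List.foldl_congr_mem
  intro acc idx _
  have h := PySem.List.foldl_ite_eq_foldl_filter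
    (fun off => 0 ≤ idx + off ∧ idx + off < n)
    (fun s off => PySem.Set.add s (idx + off))
    (PySem.List.pyRange (-c) (c + 1) 1) acc
  rw [h, ← PySem.Set.update_map_eq_foldl_add _ (fun off => idx + off)]
  rfl

-- B's per-index coverage test, characterised
theorem pv_covered_iff (lines keywords : List String) (c j : Int) :
    pvCovered (lines.map (pvMatches keywords)) (lines.length : Int) c j = true
      ↔ ∃ i, pvMatchIdx lines keywords i ∧ i - c ≤ j ∧ j ≤ i + c := by
  simp only [pvCovered, List.any_eq_true, PySem.List.mem_pyRange_one]
  constructor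
  · rintro ⟨k, ⟨hk1, hk2⟩, hm⟩
    have h0 : (0 : Int) ≤ k := le_trans (le_max_left _ _) hk1
    have hkn : k < (lines.length : Int) := lt_of_lt_of_le hk2 (min_le_left _ _)
    rw [PySem.List.pyGetD_eq_getElem _ _ h0 (by simpa using hkn)] at hm
    rw [List.getElem_map] at hm
    exact ⟨k, ⟨k.toNat, by omega, by omega, hm⟩, by omega, by omega⟩
  · rintro ⟨i, ⟨k, hk, rfl, hm⟩, h1, h2⟩
    refine ⟨(k : Int), ⟨by omega, by omega⟩, ?_⟩
    rw [PySem.List.pyGetD_eq_getElem _ _ (by omega) (by simp; omega)]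
    rw [List.getElem_map]
    simpa using hm

def pvCovList (lines keywords : List String) (c : Int) : List Int :=
  (PySem.List.pyRange 0 (lines.length : Int) 1).filter
    (pvCovered (lines.map (pvMatches keywords)) (lines.length : Int) c)

-- A's sorted expanded index list IS B's covered-index list
theorem pv_sorted_eq (lines keywords : List String) (c : Int) :
    PySem.List.sorted
      (((PySem.List.enumerate lines 0).foldl
          (fun s p => if pvMatches keywords p.2 then PySem.Set.add s p.1 else s)
          PySem.Set.empty).foldl
        (fun s idx =>
          (PySem.List.pyRange (-c) (c + 1) 1).foldl
            (fun s offset =>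
              if 0 ≤ idx + offset ∧ idx + offset < (lines.length : Int) then
                PySem.Set.add s (idx + offset)
              else s) s)
        PySem.Set.empty)
      (fun x => x) false
    = pvCovList lines keywords c := by
  apply PySem.List.sorted_eq_of_perm_of_pairwise_lt
  · rw [pv_expanded_eq]
    apply (List.perm_ext_iff_of_nodup ?_ ?_).mpr
    · intro y
      rw [pv_mem_foldl_update]
      simp only [PySem.Set.empty, List.not_mem_nil, false_or]
      rw [pvCovList, List.mem_filter, PySem.List.mem_pyRange_one]
      constructor
      · rintro ⟨⟨h0, hn⟩, hcov⟩
        obtain ⟨i, hmi, h1, h2⟩ := (pv_covered_iff lines keywords c y).mp hcov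
        exact ⟨i, (pv_mem_matching lines keywords i).mpr hmi,
          (pv_mem_neigh c _ i y).mpr ⟨h0, hn, h1, h2⟩⟩
      · rintro ⟨i, hi, hy⟩
        obtain ⟨h0, hn, h1, h2⟩ := (pv_mem_neigh c _ i y).mp hy
        exact ⟨⟨h0, hn⟩, (pv_covered_iff lines keywords c y).mpr
          ⟨i, (pv_mem_matching lines keywords i).mp hi, h1, h2⟩⟩
    · unfold pvCovList
      exact (PySem.List.nodup_pyRange_one _ _).filter _
    · exact pv_nodup_foldl_update _ _ _ (by simp [PySem.Set.empty])
  · unfold pvCovList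
    exact (PySem.List.pairwise_lt_pyRange_one _ _).filter _

-- A's grouping step and B's passage-building step (covered branch)
def pvAstep (st : List (List Int) × List Int) (idx : Int) : List (List Int) × List Int :=
  if idx - PySem.List.pyGetD st.2 (-1) 0 ≤ 2 then (st.1, st.2 ++ [idx])
  else (st.1 ++ [st.2], [idx])

def pvBstep (lines : List String) (st : List String × List String × Option Int) (j : Int) :
    List String × List String × Option Int :=
  if (match st.2.2 with | none => true | some l => decide (2 < j - l)) then
    ((if st.2.1 = [] then st.1 else st.1 ++ [PySem.Str.join "\n" st.2.1]),
     [PySem.List.pyGetD lines j ""], some j)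
  else (st.1, st.2.1 ++ [PySem.List.pyGetD lines j ""], some j)

-- the grouping simulation: B's scan state mirrors A's (groups, current) through pvJ/pvG
theorem pv_sim (lines : List String) (rest : List Int) :
    ∀ (gs : List (List Int)) (cur : List Int), cur ≠ [] →
      rest.foldl (pvBstep lines)
          (gs.map (pvJ lines), cur.map (pvG lines), some (PySem.List.pyGetD cur (-1) 0))
        = ((rest.foldl pvAstep (gs, cur)).1.map (pvJ lines),
           (rest.foldl pvAstep (gs, cur)).2.map (pvG lines),
           some (PySem.List.pyGetD (rest.foldl pvAstep (gs, cur)).2 (-1) 0))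
      ∧ (rest.foldl pvAstep (gs, cur)).2 ≠ [] := by
  induction rest with
  | nil => intro gs cur hcur; exact ⟨rfl, hcur⟩
  | cons idx t ih =>
    intro gs cur hcur
    simp only [List.foldl_cons]
    by_cases h : idx - PySem.List.pyGetD cur (-1) 0 ≤ 2
    · have hA : pvAstep (gs, cur) idx = (gs, cur ++ [idx]) := by
        simp [pvAstep, h]
      have hB : pvBstep lines (gs.map (pvJ lines), cur.map (pvG lines),
            some (PySem.List.pyGetD cur (-1) 0)) idx
          = (gs.map (pvJ lines), (cur ++ [idx]).map (pvG lines),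
             some (PySem.List.pyGetD (cur ++ [idx]) (-1) 0)) := by
        simp only [pvBstep]
        rw [if_neg (by simpa using h)]
        simp [pvG, PySem.List.pyGetD, PySem.List.pyGet?, PySem.List.pyIdx?]
      rw [hA, hB]
      exact ih _ _ (by simp)
    · have hA : pvAstep (gs, cur) idx = (gs ++ [cur], [idx]) := by
        simp [pvAstep, h]
      have hB : pvBstep lines (gs.map (pvJ lines), cur.map (pvG lines),
            some (PySem.List.pyGetD cur (-1) 0)) idx
          = ((gs ++ [cur]).map (pvJ lines), [idx].map (pvG lines),
             some (PySem.List.pyGetD [idx] (-1) 0)) := by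
        simp only [pvBstep]
        rw [if_pos (by simp only [decide_eq_true_eq]; omega)]
        rw [if_neg (by simpa using hcur)]
        simp [pvJ, pvG, PySem.List.pyGetD, PySem.List.pyGet?, PySem.List.pyIdx?]
      rw [hA, hB]
      exact ih _ _ (by simp)

theorem pv_slice_map {α β : Type} (f : α → β) (l : List α) (b : Int) :
    PySem.List.slice (l.map f) none (some b) = (PySem.List.slice l none (some b)).map f := by
  simp [PySem.List.slice, PySem.List.clampIdx, List.map_take]

-- B's whole scan, rewritten over the covered-index list
theorem pv_b_fold (lines keywords : List String) (c : Int) :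
    (PySem.List.pyRange 0 (lines.length : Int) 1).foldl
        (fun (st : List String × List String × Option Int) j =>
          if pvCovered (lines.map (pvMatches keywords)) (lines.length : Int) c j then
            if (match st.2.2 with | none => true | some l => decide (2 < j - l)) then
              ((if st.2.1 = [] then st.1 else st.1 ++ [PySem.Str.join "\n" st.2.1]),
               [PySem.List.pyGetD lines j ""], some j)
            else (st.1, st.2.1 ++ [PySem.List.pyGetD lines j ""], some j)
          else st)
        ([], [], none)
      = (pvCovList lines keywords c).foldl (pvBstep lines) ([], [], none) := by
  have h := PySem.List.foldl_if_eq_foldl_filter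
    (pvCovered (lines.map (pvMatches keywords)) (lines.length : Int) c)
    (pvBstep lines)
    (PySem.List.pyRange 0 (lines.length : Int) 1)
    (([], [], none) : List String × List String × Option Int)
  exact h


-- final assembly of the non-degenerate case: A's group build+join equals B's flushed scan
theorem pv_main (lines : List String) (mp : Int) (f : Int) (r : List Int) :
    (PySem.List.slice
        ((r.foldl pvAstep ([], [f])).1 ++ [(r.foldl pvAstep ([], [f])).2])
        none (some mp)).map (pvJ lines)
      = PySem.List.slice
          (if ((f :: r).foldl (pvBstep lines) ([], [], none)).2.1 = []
           then ((f :: r).foldl (pvBstep lines) ([], [], none)).1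
           else ((f :: r).foldl (pvBstep lines) ([], [], none)).1
                ++ [PySem.Str.join "\n" ((f :: r).foldl (pvBstep lines) ([], [], none)).2.1])
          none (some mp) := by
  have h0 : pvBstep lines ([], [], none) f
      = (([] : List (List Int)).map (pvJ lines), [f].map (pvG lines),
         some (PySem.List.pyGetD [f] (-1) 0)) := by
    simp [pvBstep, pvG, PySem.List.pyGetD, PySem.List.pyGet?, PySem.List.pyIdx?]
  obtain ⟨hsim, hne⟩ := pv_sim lines r ([]) [f] (by simp)
  rw [List.foldl_cons, h0, hsim]
  rw [if_neg (by simpa using hne)]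
  show (PySem.List.slice ((r.foldl pvAstep ([], [f])).1 ++ [(r.foldl pvAstep ([], [f])).2])
          none (some mp)).map (pvJ lines)
      = PySem.List.slice
          ((r.foldl pvAstep ([], [f])).1.map (pvJ lines) ++ [pvJ lines (r.foldl pvAstep ([], [f])).2])
          none (some mp)
  rw [show [pvJ lines (r.foldl pvAstep ([], [f])).2]
        = [(r.foldl pvAstep ([], [f])).2].map (pvJ lines) from rfl,
     ← List.map_append, pv_slice_map]

-- ===== VERDICT (by name: the statement is the Claim_ definition above) =====
theorem extract_passages_py_spec : Claim_equal_extract_passages_py := by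
  intro t kws c mp _ hpre
  unfold Spec_extract_passages_py
  by_cases h1 : kws = [] ∨ t = ""
  · simp only [extract_passages_py, extract_passages_py_alt, if_pos h1]
  · simp only [extract_passages_py, extract_passages_py_alt, if_neg h1]
    by_cases hm : (pvLines t).map (pvMatches kws) |>.contains true
    · obtain ⟨ln, hln, hmln⟩ := List.mem_map.mp (by simpa using hm)
      obtain ⟨k, hk, hkE⟩ := List.mem_iff_getElem.mp hln
      have hmi : pvMatchIdx (pvLines t) kws (k : Int) := ⟨k, hk, rfl, hkE ▸ hmln⟩
      have hc : 0 ≤ c := by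
        rcases hpre with h | h | h
        · exact h
        · exact absurd (Or.inl h) h1
        · rw [List.all_eq_true] at h
          have := h ln hln
          rw [hmln] at this
          simp at this
      have hlines : pvLines t ≠ [] := by
        intro h; rw [h] at hln; cases hln
      rw [if_neg hlines]
      have hmatmem : (k : Int) ∈ (PySem.List.enumerate (pvLines t) 0).foldl
          (fun s p => if pvMatches kws p.2 then PySem.Set.add s p.1 else s) PySem.Set.empty :=
        (pv_mem_matching _ _ _).mpr hmi
      rw [if_neg (List.ne_nil_of_mem hmatmem)]
      rw [pv_sorted_eq]
      have hcovmem : (k : Int) ∈ pvCovList (pvLines t) kws c := by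
        rw [pvCovList, List.mem_filter, PySem.List.mem_pyRange_one]
        exact ⟨⟨by omega, by omega⟩,
          (pv_covered_iff _ _ _ _).mpr ⟨(k : Int), hmi, by omega, by omega⟩⟩
      rw [pv_b_fold]
      obtain ⟨f, r, hfr⟩ : ∃ f r, pvCovList (pvLines t) kws c = f :: r := by
        cases h : pvCovList (pvLines t) kws c with
        | nil => rw [h] at hcovmem; cases hcovmem
        | cons f r => exact ⟨f, r, rfl⟩
      rw [hfr, if_neg (by simpa using hm)]
      exact pv_main (pvLines t) mp f r
    · have hm' : ((pvLines t).map (pvMatches kws)).contains true = false := by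
        simpa using hm
      conv_rhs => rw [if_pos (show (!((pvLines t).map (pvMatches kws)).contains true) = true by
        rw [hm']; rfl)]
      by_cases hl : pvLines t = []
      · rw [if_pos hl]
      · rw [if_neg hl]
        have hmat : (PySem.List.enumerate (pvLines t) 0).foldl
            (fun s p => if pvMatches kws p.2 then PySem.Set.add s p.1 else s) PySem.Set.empty
            = [] := by
          rw [List.eq_nil_iff_forall_not_mem]
          intro y hy
          obtain ⟨k, hk, rfl, hmk⟩ := (pv_mem_matching _ _ _).mp hy
          have : true ∈ (pvLines t).map (pvMatches kws) :=
            List.mem_map.mpr ⟨(pvLines t)[k], List.getElem_mem hk, hmk⟩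
          rw [← List.contains_iff_mem, hm'] at this
          cases this
        rw [if_pos hmat]
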